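-- pv_equiv track=rewrite | github.com/sujin53/Algorithm-Study | Sujin Kim/weak 4-2 dynamic_programming/N.py | solution
-- ===== SOURCE A (Python) =====
-- def solution(N, number):
--
--     numbers = [set([N*int('1'*i)]) for i in range(1, 9)]
--
--     for i in range(8):
--         for j in range(i):
--             for num1 in numbers[j]:
--                 for num2 in numbers[i-j-1]:
--
--                     numbers[i].add(num1 + num2)
--                     numbers[i].add(num1 - num2)
--                     numbers[i].add(num1 * num2)
--                     if num2 != 0:
--                         numbers[i].add(num1//num2)
--
--         if number in numbers[i]:
--             return i+1
--     return -1
-- ===== SOURCE B (Python) =====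
-- def solution(N, number):
--     # Top-down recursion: dp(k) = the set of values expressible with exactly k copies of N.
--     def dp(k):
--         vals = {N * int('1' * k)}
--         for j in range(1, k):
--             for a in dp(j):
--                 for b in dp(k - j):
--                     vals |= {a + b, a - b, a * b}
--                     if b:
--                         vals.add(a // b)
--         return vals
--     for k in range(1, 9):
--         if number in dp(k):
--             return k
--     return -1
-- ===== Notes on version B (the rewrite author's own statement) =====
-- stated objective: alternative
-- what changed: Replaces A's in-place build of an 8-slot array of sets (triple nested index loops mutating numbers[i], early return i+1) by a pure top-down recursion dp(k) over the same recurrence, with a separate scan k=1..8 for the answer.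
import Mathlib
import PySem

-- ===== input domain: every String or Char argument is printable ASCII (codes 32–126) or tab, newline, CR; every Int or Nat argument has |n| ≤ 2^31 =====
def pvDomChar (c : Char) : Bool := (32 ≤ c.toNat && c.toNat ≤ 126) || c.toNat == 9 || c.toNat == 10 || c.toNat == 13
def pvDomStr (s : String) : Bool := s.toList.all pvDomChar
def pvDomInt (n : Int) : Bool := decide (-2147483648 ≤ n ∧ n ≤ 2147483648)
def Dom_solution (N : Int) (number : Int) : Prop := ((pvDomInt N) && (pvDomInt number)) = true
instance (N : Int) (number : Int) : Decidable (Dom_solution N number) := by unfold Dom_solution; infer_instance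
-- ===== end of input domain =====

-- B replaces A's in-place build of an 8-slot array of sets (nested index loops mutating
-- numbers[i], early return) by a pure top-down recursion dp(k) over the same recurrence,
-- plus a separate scan k = 1..8; objective: alternative decomposition (not faster).

-- ===== PORT A =====
-- int('1'*k): always parses for k ≥ 1 (a non-empty string of '1's), so .getD 0 is never hit
-- on the indices A uses (shared by both ports, as both Pythons contain this expression).
def pyRepunit (k : Nat) : Int := (PySem.Int.ofStr? (String.ofList (List.replicate k '1'))).getD 0

-- the four adds of A's innermost loop body, in order
def opsAddA (s : PySem.Set Int) (a b : Int) : PySem.Set Int :=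
  let s := PySem.Set.add s (a + b)
  let s := PySem.Set.add s (a - b)
  let s := PySem.Set.add s (a * b)
  if b ≠ 0 then PySem.Set.add s (PySem.Int.floordiv a b) else s

-- the inner three loops of A at outer index i: grow numbers[i] from all pairs
-- (indices j, i-j-1 are provably in range, so getD's default is never hit)
def combineA (numbers : List (PySem.Set Int)) (i : Nat) : PySem.Set Int :=
  (List.range i).foldl (fun s j =>
    (numbers.getD j []).foldl (fun s a =>
      (numbers.getD (i - j - 1) []).foldl (fun s b => opsAddA s a b) s) s)
    (numbers.getD i [])

-- the outer 'for i in range(8)' with its early return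
def goA (number : Int) : List (PySem.Set Int) → List Nat → Int
  | _, [] => -1
  | numbers, i :: rest =>
    let si := combineA numbers i
    if PySem.Set.contains si number then ((i : Int) + 1)
    else goA number (numbers.set i si) rest

def solution (N : Int) (number : Int) : Int :=
  let numbers := (List.range' 1 8).map (fun i => PySem.Set.ofList [N * pyRepunit i])
  goA number numbers (List.range 8)

-- ===== PORT B =====
-- dp(k): the set of values expressible with exactly k copies of N (Source B's recursion;
-- attach only carries the membership proof needed for termination)
def dpB (N : Int) (k : Nat) : PySem.Set Int :=
  (List.range' 1 (k - 1)).attach.foldl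
    (fun s j =>
      (dpB N j.1).foldl (fun s a =>
        (dpB N (k - j.1)).foldl (fun s b =>
          let s' := PySem.Set.update s [a + b, a - b, a * b]
          if b ≠ 0 then PySem.Set.add s' (PySem.Int.floordiv a b) else s') s) s)
    (PySem.Set.ofList [N * pyRepunit k])
termination_by k
decreasing_by
  · have := List.mem_range'.mp j.2; omega
  · have := List.mem_range'.mp j.2; omega

def solution_alt (N : Int) (number : Int) : Int :=
  match (List.range' 1 8).find? (fun k => PySem.Set.contains (dpB N k) number) with
  | some k => (k : Int)
  | none => -1

-- ===== PRECONDITION & SPEC =====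
def Spec_solution (N : Int) (number : Int) (out : Int) : Prop := out = solution_alt N number
instance (N : Int) (number : Int) (out : Int) : Decidable (Spec_solution N number out) := by unfold Spec_solution; infer_instance

-- ===== CLAIM (what is proved, stated in full; the proofs are below) =====
def Claim_equal_solution : Prop := ∀ (N : Int) (number : Int), Dom_solution N number → Spec_solution N number (solution N number)

-- ===== LEMMAS AND PROOFS =====

-- the multiset of results A and B both add for a pair (a, b)
def results (a b : Int) : List Int :=
  [a + b, a - b, a * b] ++ (if b ≠ 0 then [PySem.Int.floordiv a b] else [])

theorem mem_foldl_step {β : Type} (g : PySem.Set Int → β → PySem.Set Int) (P : β → Int → Prop)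
    (hg : ∀ s e y, y ∈ g s e ↔ y ∈ s ∨ P e y) :
    ∀ (l : List β) (s : PySem.Set Int) (y : Int),
      y ∈ l.foldl g s ↔ y ∈ s ∨ ∃ e ∈ l, P e y := by
  intro l
  induction l with
  | nil => simp
  | cons e l ih =>
    intro s y
    simp only [List.foldl_cons, ih, hg]
    constructor
    · rintro (⟨h | h⟩ | ⟨e', he', h⟩)
      · exact Or.inl h
      · exact Or.inr ⟨e, by simp, h⟩
      · exact Or.inr ⟨e', by simp [he'], h⟩
    · rintro (h | ⟨e', he', h⟩)
      · exact Or.inl (Or.inl h)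
      · rcases List.mem_cons.mp he' with rfl | he'
        · exact Or.inl (Or.inr h)
        · exact Or.inr ⟨e', he', h⟩

theorem mem_opsAddA (s : PySem.Set Int) (a b y : Int) :
    y ∈ opsAddA s a b ↔ y ∈ s ∨ y ∈ results a b := by
  unfold opsAddA results
  by_cases hb : b ≠ 0 <;> simp [hb, PySem.Set.mem_add] <;> tauto

theorem mem_innerB (s : PySem.Set Int) (a b y : Int) :
    y ∈ (let s' := PySem.Set.update s [a + b, a - b, a * b]
         if b ≠ 0 then PySem.Set.add s' (PySem.Int.floordiv a b) else s') ↔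
      y ∈ s ∨ y ∈ results a b := by
  unfold results
  by_cases hb : b ≠ 0 <;> simp [hb, PySem.Set.mem_add] <;> tauto

-- double fold over two fixed sets
theorem mem_pairFold (g : PySem.Set Int → Int → Int → PySem.Set Int)
    (hg : ∀ s a b y, y ∈ g s a b ↔ y ∈ s ∨ y ∈ results a b)
    (sa sb : List Int) (s : PySem.Set Int) (y : Int) :
    y ∈ sa.foldl (fun s a => sb.foldl (fun s b => g s a b) s) s ↔
      y ∈ s ∨ ∃ a ∈ sa, ∃ b ∈ sb, y ∈ results a b := by
  exact mem_foldl_step _ (fun a y => ∃ b ∈ sb, y ∈ results a b)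
    (fun s a y => mem_foldl_step _ (fun b y => y ∈ results a b) (fun s b y => hg s a b y) sb s y)
    sa s y

theorem mem_combineA (numbers : List (PySem.Set Int)) (i : Nat) (y : Int) :
    y ∈ combineA numbers i ↔
      y ∈ numbers.getD i [] ∨
        ∃ j ∈ List.range i, ∃ a ∈ numbers.getD j [], ∃ b ∈ numbers.getD (i - j - 1) [],
          y ∈ results a b := by
  unfold combineA
  exact mem_foldl_step _
    (fun j y => ∃ a ∈ numbers.getD j [], ∃ b ∈ numbers.getD (i - j - 1) [], y ∈ results a b)
    (fun s j y => mem_pairFold _ mem_opsAddA _ _ s y) _ _ y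

theorem mem_dpB (N : Int) (k : Nat) (y : Int) :
    y ∈ dpB N k ↔
      y = N * pyRepunit k ∨
        ∃ j ∈ List.range' 1 (k - 1), ∃ a ∈ dpB N j, ∃ b ∈ dpB N (k - j), y ∈ results a b := by
  rw [dpB]
  rw [mem_foldl_step _
    (fun (j : {x // x ∈ List.range' 1 (k - 1)}) y =>
      ∃ a ∈ dpB N j.1, ∃ b ∈ dpB N (k - j.1), y ∈ results a b)
    (fun s j y => mem_pairFold _ mem_innerB _ _ s y)]
  simp [PySem.Set.mem_ofList]

-- the two characterizations coincide level by level, under A's loop invariant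
theorem level_equiv (N : Int) (i : Nat) (numbers : List (PySem.Set Int))
    (hlow : ∀ j, j < i → ∀ x, (x ∈ numbers.getD j [] ↔ x ∈ dpB N (j + 1)))
    (hseed : numbers.getD i [] = [N * pyRepunit (i + 1)]) (y : Int) :
    y ∈ combineA numbers i ↔ y ∈ dpB N (i + 1) := by
  rw [mem_combineA, mem_dpB, hseed]
  simp only [List.mem_singleton, List.mem_range, List.mem_range', Nat.add_sub_cancel]
  constructor
  · rintro (h | ⟨j, hj, a, ha, b, hb, hy⟩)
    · exact Or.inl h
    · refine Or.inr ⟨j + 1, ⟨by omega, by omega⟩, a, (hlow j hj a).mp ha, b, ?_, hy⟩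
      have h1 : i + 1 - (j + 1) = (i - j - 1) + 1 := by omega
      rw [h1]
      exact (hlow (i - j - 1) (by omega) b).mp hb
  · rintro (h | ⟨j', ⟨hj1, hj2⟩, a, ha, b, hb, hy⟩)
    · exact Or.inl h
    · refine Or.inr ⟨j' - 1, by omega, a, ?_, b, ?_, hy⟩
      · have h1 : (j' - 1) + 1 = j' := by omega
        exact (hlow (j' - 1) (by omega) a).mpr (h1 ▸ ha)
      · have h1 : (i - (j' - 1) - 1) + 1 = i + 1 - j' := by omega
        exact (hlow (i - (j' - 1) - 1) (by omega) b).mpr (h1 ▸ hb)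

theorem goA_eq (N number : Int) :
    ∀ (n i₀ : Nat), i₀ + n = 8 → ∀ numbers : List (PySem.Set Int), numbers.length = 8 →
      (∀ j, j < i₀ → ∀ x, (x ∈ numbers.getD j [] ↔ x ∈ dpB N (j + 1))) →
      (∀ j, i₀ ≤ j → j < 8 → numbers.getD j [] = [N * pyRepunit (j + 1)]) →
      goA number numbers (List.range' i₀ n) =
        (match (List.range' (i₀ + 1) n).find? (fun k => PySem.Set.contains (dpB N k) number) with
         | some k => (k : Int) | none => -1) := by
  intro n
  induction n with
  | zero => intro i₀ _ numbers _ _ _; simp [goA]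
  | succ n ih =>
    intro i₀ h8 numbers hlen hlow hseed
    rw [List.range'_succ, List.range'_succ]
    have hi8 : i₀ < 8 := by omega
    have hmem : ∀ y, y ∈ combineA numbers i₀ ↔ y ∈ dpB N (i₀ + 1) :=
      level_equiv N i₀ numbers hlow (hseed i₀ le_rfl hi8)
    have hcont : PySem.Set.contains (combineA numbers i₀) number
        = PySem.Set.contains (dpB N (i₀ + 1)) number := by
      rw [Bool.eq_iff_iff, PySem.Set.contains_iff, PySem.Set.contains_iff]
      exact hmem number
    simp only [goA, List.find?_cons, hcont]
    cases hfound : PySem.Set.contains (dpB N (i₀ + 1)) number with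
    | true =>
      simp only [if_true]
      push_cast; ring
    | false =>
      simp only [Bool.false_eq_true, if_false]
      have hlt : i₀ < numbers.length := by omega
      rw [ih (i₀ + 1) (by omega) _ (by simpa using hlen) ?_ ?_]
      · intro j hj x
        by_cases hji : j = i₀
        · subst hji
          have : (numbers.set j (combineA numbers j)).getD j [] = combineA numbers j := by
            simp [List.getD, hlt]
          rw [this]; exact hmem x
        · have : (numbers.set i₀ (combineA numbers i₀)).getD j [] = numbers.getD j [] := by
            simp [List.getD, List.getElem?_set_ne (by omega : i₀ ≠ j)]
          rw [this]; exact hlow j (by omega) x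
      · intro j hj1 hj2
        have : (numbers.set i₀ (combineA numbers i₀)).getD j [] = numbers.getD j [] := by
          simp [List.getD, List.getElem?_set_ne (by omega : i₀ ≠ j)]
        rw [this]; exact hseed j (by omega) hj2

theorem seed_getD (N : Int) (j : Nat) (hj : j < 8) :
    ((List.range' 1 8).map (fun i => PySem.Set.ofList [N * pyRepunit i])).getD j []
      = [N * pyRepunit (j + 1)] := by
  have h : j < ((List.range' 1 8).map (fun i => PySem.Set.ofList [N * pyRepunit i])).length := by
    simp [hj]
  rw [List.getD, List.getElem?_eq_getElem h, Option.getD_some, List.getElem_map,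
    List.getElem_range']
  simp [PySem.Set.ofList, PySem.Set.add, Nat.add_comm]

-- ===== VERDICT (by name: the statement is the Claim_ definition above) =====
theorem solution_spec : Claim_equal_solution := by
  intro N number _
  unfold Spec_solution solution solution_alt
  rw [List.range_eq_range']
  rw [goA_eq N number 8 0 rfl _ (by simp) (by omega) (fun j _ hj => seed_getD N j hj)]
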